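-- pv_equiv track=rewrite | github.com/ketan564/Final-repo | app.py | _get_relevant_context
-- ===== SOURCE A (Python) =====
-- def _get_relevant_context(message: str) -> str:
--     """Get concise, web-relevant context"""
--     context_parts = []
--
--     # Web-focused keywords
--     if any(word in message for word in ['url', 'link', 'website', 'browse']):
--         context_parts.append("URL SAFETY: Check domain, look for HTTPS, avoid shortened links")
--
--     if any(word in message for word in ['email', 'mail', 'inbox']):
--         context_parts.append("EMAIL SAFETY: Verify sender, check for urgency, don't click suspicious links")
--
--     if any(word in message for word in ['password', 'login', 'account']):
--         context_parts.append("ACCOUNT SAFETY: Use 2FA, strong passwords, never share via email")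
--
--     if any(word in message for word in ['safe', 'protect', 'secure']):
--         context_parts.append("GENERAL: Keep software updated, use HTTPS, be wary of urgent requests")
--
--     return " | ".join(context_parts) if context_parts else "Web security best practices"
-- ===== SOURCE B (Python) =====
-- # B: compute a 4-bit match mask and look the answer up in a precomputed
-- # 16-entry table of final strings, instead of building and joining a list
-- # per call.
-- _RULES = [
--     (['url', 'link', 'website', 'browse'],
--      "URL SAFETY: Check domain, look for HTTPS, avoid shortened links"),
--     (['email', 'mail', 'inbox'],
--      "EMAIL SAFETY: Verify sender, check for urgency, don't click suspicious links"),
--     (['password', 'login', 'account'],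
--      "ACCOUNT SAFETY: Use 2FA, strong passwords, never share via email"),
--     (['safe', 'protect', 'secure'],
--      "GENERAL: Keep software updated, use HTTPS, be wary of urgent requests"),
-- ]
--
-- # table[mask] = final answer when exactly the rules whose bit is set matched
-- _TABLE = [
--     (" | ".join(adv for i, (_, adv) in enumerate(_RULES) if (mask // 2 ** i) % 2 == 1)
--      or "Web security best practices")
--     for mask in range(16)
-- ]
--
-- def _get_relevant_context(message: str) -> str:
--     mask = 0
--     for i, (keywords, _) in enumerate(_RULES):
--         if any(word in message for word in keywords):
--             mask += 2 ** i
--     return _TABLE[mask]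
-- ===== Notes on version B (the rewrite author's own statement) =====
-- stated objective: alternative
-- what changed: B computes a 4-bit mask of which keyword groups match and returns a string from a 16-entry table of precomputed final answers, instead of appending advice strings to a list per branch and joining them per call.
import Mathlib
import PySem

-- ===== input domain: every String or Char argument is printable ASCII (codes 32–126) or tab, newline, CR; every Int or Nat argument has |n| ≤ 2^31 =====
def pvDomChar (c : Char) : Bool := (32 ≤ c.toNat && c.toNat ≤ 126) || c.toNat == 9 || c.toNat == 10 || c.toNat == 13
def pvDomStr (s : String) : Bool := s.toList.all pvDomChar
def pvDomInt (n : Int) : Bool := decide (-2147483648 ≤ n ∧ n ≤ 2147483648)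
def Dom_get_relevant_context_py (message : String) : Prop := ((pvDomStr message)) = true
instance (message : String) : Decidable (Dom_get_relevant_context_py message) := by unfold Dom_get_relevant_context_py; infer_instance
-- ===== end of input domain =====

-- B computes a 4-bit mask of matched keyword groups and looks the answer up in a precomputed 16-entry table of final strings (objective: alternative).


-- ===== PORT A =====
def get_relevant_context_py (message : String) : String :=
  let context_parts : List String := []
  let context_parts :=
    if (["url", "link", "website", "browse"].any (fun word => PySem.Str.isIn word message)) then
      context_parts ++ ["URL SAFETY: Check domain, look for HTTPS, avoid shortened links"]
    else context_parts
  let context_parts :=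
    if (["email", "mail", "inbox"].any (fun word => PySem.Str.isIn word message)) then
      context_parts ++ ["EMAIL SAFETY: Verify sender, check for urgency, don't click suspicious links"]
    else context_parts
  let context_parts :=
    if (["password", "login", "account"].any (fun word => PySem.Str.isIn word message)) then
      context_parts ++ ["ACCOUNT SAFETY: Use 2FA, strong passwords, never share via email"]
    else context_parts
  let context_parts :=
    if (["safe", "protect", "secure"].any (fun word => PySem.Str.isIn word message)) then
      context_parts ++ ["GENERAL: Keep software updated, use HTTPS, be wary of urgent requests"]
    else context_parts
  if context_parts = [] then "Web security best practices" else PySem.Str.join " | " context_parts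

-- ===== PORT B =====
def pvRules : List (List String × String) :=
  [(["url", "link", "website", "browse"],
    "URL SAFETY: Check domain, look for HTTPS, avoid shortened links"),
   (["email", "mail", "inbox"],
    "EMAIL SAFETY: Verify sender, check for urgency, don't click suspicious links"),
   (["password", "login", "account"],
    "ACCOUNT SAFETY: Use 2FA, strong passwords, never share via email"),
   (["safe", "protect", "secure"],
    "GENERAL: Keep software updated, use HTTPS, be wary of urgent requests")]

-- _TABLE: for each mask in range(16), the joined advices of the set bits, or the fallback
def pvTable : List String :=
  (PySem.List.pyRange 0 16 1).map (fun mask =>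
    let s := PySem.Str.join " | "
      (((PySem.List.enumerate pvRules).filter
          (fun p => PySem.Int.mod (PySem.Int.floordiv mask (2 ^ p.1.toNat)) 2 = 1)).map
        (fun p => p.2.2))
    if s = "" then "Web security best practices" else s)

def get_relevant_context_py_alt (message : String) : String :=
  let mask : Int :=
    (PySem.List.enumerate pvRules).foldl
      (fun m p => if p.2.1.any (fun word => PySem.Str.isIn word message) then m + 2 ^ p.1.toNat else m) 0
  -- mask ∈ [0, 16), so the lookup _TABLE[mask] never falls to the default
  PySem.List.pyGetD pvTable mask ""

-- ===== PRECONDITION & SPEC =====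
def Spec_get_relevant_context_py (message : String) (out : String) : Prop := out = get_relevant_context_py_alt message
instance (message : String) (out : String) : Decidable (Spec_get_relevant_context_py message out) := by unfold Spec_get_relevant_context_py; infer_instance

-- ===== CLAIM (what is proved, stated in full; the proofs are below) =====
def Claim_equal_get_relevant_context_py : Prop := ∀ (message : String), Dom_get_relevant_context_py message → Spec_get_relevant_context_py message (get_relevant_context_py message)

-- ===== LEMMAS AND PROOFS =====

-- ===== VERDICT (by name: the statement is the Claim_ definition above) =====
set_option maxRecDepth 4000 in
theorem get_relevant_context_py_spec : Claim_equal_get_relevant_context_py := by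
  intro message _
  unfold Spec_get_relevant_context_py get_relevant_context_py get_relevant_context_py_alt pvTable pvRules
  cases h1 : ["url", "link", "website", "browse"].any (fun word => PySem.Str.isIn word message) <;>
  cases h2 : ["email", "mail", "inbox"].any (fun word => PySem.Str.isIn word message) <;>
  cases h3 : ["password", "login", "account"].any (fun word => PySem.Str.isIn word message) <;>
  cases h4 : ["safe", "protect", "secure"].any (fun word => PySem.Str.isIn word message) <;>
  simp only [PySem.List.enumerate, h1, h2, h3, h4, List.foldl] <;> rfl
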